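-- pv_equiv track=rewrite | github.com/Anish984/GraphicsAndMultiMedia | Bresenhem_Line_drawing_algo.py | draw_bresenham_line
-- ===== SOURCE A (Python) =====
-- def draw_bresenham_line(x_start, y_start, x_end, y_end):
--     x_vals = []
--     y_vals = []
--
--     dx = abs(x_end - x_start)
--     dy = abs(y_end - y_start)
--
--     x, y = x_start, y_start
--     step_x = 1 if x_end > x_start else -1
--     step_y = 1 if y_end > y_start else -1
--
--     if dy <= dx:
--         decision = 2 * dy - dx
--         for _ in range(dx + 1):
--             x_vals.append(x)
--             y_vals.append(y)
--             if decision >= 0: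
--                 y += step_y
--                 decision -= 2 * dx
--             x += step_x
--             decision += 2 * dy
--     else:
--         decision = 2 * dx - dy
--         for _ in range(dy + 1):
--             x_vals.append(x)
--             y_vals.append(y)
--             if decision >= 0:
--                 x += step_x
--                 decision -= 2 * dy
--             y += step_y
--             decision += 2 * dx
--
--     return x_vals, y_vals
-- ===== SOURCE B (Python) =====
-- def draw_bresenham_line(x_start, y_start, x_end, y_end):
--     dx = abs(x_end - x_start)
--     dy = abs(y_end - y_start)
--     sx = 1 if x_end > x_start else -1
--     sy = 1 if y_end > y_start else -1
--     major, minor = (dx, dy) if dy <= dx else (dy, dx)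
--     if major == 0:
--         return [x_start], [y_start]
--     xs, ys = [], []
--     for i in range(major + 1):
--         m = (2 * minor * i + major) // (2 * major)
--         if dy <= dx:
--             xs.append(x_start + i * sx)
--             ys.append(y_start + m * sy)
--         else:
--             xs.append(x_start + m * sx)
--             ys.append(y_start + i * sy)
--     return xs, ys
-- ===== Notes on version B (the rewrite author's own statement) =====
-- stated objective: alternative
-- what changed: Replaces the incremental error/decision accumulator with a direct closed-form computation: each point's minor-axis displacement is (2*minor*i + major) // (2*major), so every pixel is computed independently from its index.
import Mathlib
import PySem

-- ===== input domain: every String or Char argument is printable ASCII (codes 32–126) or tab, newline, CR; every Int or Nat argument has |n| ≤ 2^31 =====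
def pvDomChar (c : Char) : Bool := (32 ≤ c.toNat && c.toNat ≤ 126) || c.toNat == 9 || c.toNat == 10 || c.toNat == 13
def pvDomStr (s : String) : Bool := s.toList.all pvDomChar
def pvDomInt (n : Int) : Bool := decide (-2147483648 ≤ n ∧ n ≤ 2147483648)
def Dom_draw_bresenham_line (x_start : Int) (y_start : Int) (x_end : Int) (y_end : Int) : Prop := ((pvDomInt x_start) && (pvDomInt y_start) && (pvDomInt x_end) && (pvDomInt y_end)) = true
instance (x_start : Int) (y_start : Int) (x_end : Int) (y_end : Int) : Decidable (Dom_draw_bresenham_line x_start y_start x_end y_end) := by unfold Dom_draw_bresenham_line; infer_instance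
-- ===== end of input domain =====

-- B replaces A's incremental decision-variable loop by a closed-form floor formula per pixel (alternative algorithm, same cost).


-- ===== PORT A =====
-- the shallow (dy ≤ dx) for-loop of A, fuel = range length
def pvLoopShallow : Nat → Int → Int → Int → Int → Int → Int → Int → List Int → List Int → List Int × List Int
  | 0, _, _, _, _, _, _, _, xs, ys => (xs, ys)
  | Nat.succ k, x, y, sx, sy, dx, dy, d, xs, ys =>
    pvLoopShallow k (x + sx) (if d ≥ 0 then y + sy else y) sx sy dx dy
      ((if d ≥ 0 then d - 2 * dx else d) + 2 * dy) (xs ++ [x]) (ys ++ [y])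

-- the steep (dy > dx) for-loop of A
def pvLoopSteep : Nat → Int → Int → Int → Int → Int → Int → Int → List Int → List Int → List Int × List Int
  | 0, _, _, _, _, _, _, _, xs, ys => (xs, ys)
  | Nat.succ k, x, y, sx, sy, dx, dy, d, xs, ys =>
    pvLoopSteep k (if d ≥ 0 then x + sx else x) (y + sy) sx sy dx dy
      ((if d ≥ 0 then d - 2 * dy else d) + 2 * dx) (xs ++ [x]) (ys ++ [y])

def draw_bresenham_line (x_start : Int) (y_start : Int) (x_end : Int) (y_end : Int) : List Int × List Int :=
  let dx := |x_end - x_start|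
  let dy := |y_end - y_start|
  let step_x : Int := if x_end > x_start then 1 else -1
  let step_y : Int := if y_end > y_start then 1 else -1
  if dy ≤ dx then
    pvLoopShallow (dx + 1).toNat x_start y_start step_x step_y dx dy (2 * dy - dx) [] []
  else
    pvLoopSteep (dy + 1).toNat x_start y_start step_x step_y dx dy (2 * dx - dy) [] []

-- ===== PORT B =====
-- closed-form minor-axis displacement at index i: (2*minor*i + major) // (2*major)
def pvMinorDisp (minor : Int) (major : Int) (i : Int) : Int :=
  PySem.Int.floordiv (2 * minor * i + major) (2 * major)

def draw_bresenham_line_alt (x_start : Int) (y_start : Int) (x_end : Int) (y_end : Int) : List Int × List Int :=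
  let dx := |x_end - x_start|
  let dy := |y_end - y_start|
  let sx : Int := if x_end > x_start then 1 else -1
  let sy : Int := if y_end > y_start then 1 else -1
  let mm := if dy ≤ dx then (dx, dy) else (dy, dx)
  let major := mm.1
  let minor := mm.2
  if major = 0 then ([x_start], [y_start])
  else
    (PySem.List.pyRange 0 (major + 1) 1).foldl
      (fun (acc : List Int × List Int) i =>
        let m := pvMinorDisp minor major i
        if dy ≤ dx then (acc.1 ++ [x_start + i * sx], acc.2 ++ [y_start + m * sy])
        else (acc.1 ++ [x_start + m * sx], acc.2 ++ [y_start + i * sy]))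
      ([], [])

-- ===== PRECONDITION & SPEC =====
def Spec_draw_bresenham_line (x_start : Int) (y_start : Int) (x_end : Int) (y_end : Int) (out : List Int × List Int) : Prop := out = draw_bresenham_line_alt x_start y_start x_end y_end
instance (x_start : Int) (y_start : Int) (x_end : Int) (y_end : Int) (out : List Int × List Int) : Decidable (Spec_draw_bresenham_line x_start y_start x_end y_end out) := by unfold Spec_draw_bresenham_line; infer_instance

-- ===== CLAIM (what is proved, stated in full; the proofs are below) =====
def Claim_equal_draw_bresenham_line : Prop := ∀ (x_start : Int) (y_start : Int) (x_end : Int) (y_end : Int), Dom_draw_bresenham_line x_start y_start x_end y_end → Spec_draw_bresenham_line x_start y_start x_end y_end (draw_bresenham_line x_start y_start x_end y_end)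

-- ===== LEMMAS AND PROOFS =====

theorem pvMinorDisp_zero (m M : Int) (hM : 0 < M) : pvMinorDisp m M 0 = 0 := by
  unfold pvMinorDisp
  rw [PySem.Int.floordiv_eq_iff_of_pos (by omega)]
  constructor <;> nlinarith

theorem pvMinorDisp_succ_pos (m M j : Int) (hM : 0 < M) (hm0 : 0 ≤ m) (hm : m ≤ M)
    (hd : 2 * m * (j + 1) - M - 2 * M * pvMinorDisp m M j ≥ 0) :
    pvMinorDisp m M (j + 1) = pvMinorDisp m M j + 1 := by
  have hq := (PySem.Int.floordiv_eq_iff_of_pos (a := 2 * m * j + M) (b := 2 * M) (by omega)).mp rfl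
  unfold pvMinorDisp at *
  rw [PySem.Int.floordiv_eq_iff_of_pos (by omega)]
  constructor <;> nlinarith [hq.1, hq.2]

theorem pvMinorDisp_succ_neg (m M j : Int) (hM : 0 < M) (hm0 : 0 ≤ m) (hm : m ≤ M)
    (hd : ¬ (2 * m * (j + 1) - M - 2 * M * pvMinorDisp m M j ≥ 0)) :
    pvMinorDisp m M (j + 1) = pvMinorDisp m M j := by
  have hq := (PySem.Int.floordiv_eq_iff_of_pos (a := 2 * m * j + M) (b := 2 * M) (by omega)).mp rfl
  unfold pvMinorDisp at *
  rw [PySem.Int.floordiv_eq_iff_of_pos (by omega)]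
  constructor <;> nlinarith [hq.1, hq.2]

theorem fold_pair (f g : Int → Int) (l : List Int) (xs ys : List Int) :
    l.foldl (fun (acc : List Int × List Int) i => (acc.1 ++ [f i], acc.2 ++ [g i])) (xs, ys)
      = (xs ++ l.map f, ys ++ l.map g) := by
  induction l generalizing xs ys with
  | nil => simp
  | cons a t ih => simp [List.foldl_cons, ih, List.append_assoc]

theorem shallow_loop (M m sx sy x0 y0 : Int) (hM : 0 < M) (hm0 : 0 ≤ m) (hm : m ≤ M) :
    ∀ (k : Nat) (j : Int), j + (k : Int) = M + 1 → ∀ (xs ys : List Int),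
      pvLoopShallow k (x0 + j * sx) (y0 + pvMinorDisp m M j * sy) sx sy M m
          (2 * m * (j + 1) - M - 2 * M * pvMinorDisp m M j) xs ys
        = (xs ++ (PySem.List.pyRange j (M + 1) 1).map (fun i => x0 + i * sx),
           ys ++ (PySem.List.pyRange j (M + 1) 1).map (fun i => y0 + pvMinorDisp m M i * sy)) := by
  intro k
  induction k with
  | zero =>
    intro j hj xs ys
    have : PySem.List.pyRange j (M + 1) 1 = [] := PySem.List.pyRange_one_eq_nil (by omega)
    simp [pvLoopShallow, this]
  | succ k ih =>
    intro j hj xs ys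
    have hjlt : j < M + 1 := by push_cast at hj; omega
    rw [PySem.List.pyRange_one_cons hjlt]
    simp only [pvLoopShallow]
    by_cases h0 : 2 * m * (j + 1) - M - 2 * M * pvMinorDisp m M j ≥ 0
    · rw [if_pos h0, if_pos h0]
      have hq1 := pvMinorDisp_succ_pos m M j hM hm0 hm h0
      have e1 : x0 + j * sx + sx = x0 + (j + 1) * sx := by ring
      have e2 : y0 + pvMinorDisp m M j * sy + sy = y0 + pvMinorDisp m M (j + 1) * sy := by
        rw [hq1]; ring
      have e3 : (2 * m * (j + 1) - M - 2 * M * pvMinorDisp m M j - 2 * M) + 2 * m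
          = 2 * m * ((j + 1) + 1) - M - 2 * M * pvMinorDisp m M (j + 1) := by rw [hq1]; ring
      rw [e1, e2, e3, ih (j + 1) (by push_cast at hj ⊢; omega)]
      simp [List.append_assoc]
    · rw [if_neg h0, if_neg h0]
      have hq1 := pvMinorDisp_succ_neg m M j hM hm0 hm h0
      have e1 : x0 + j * sx + sx = x0 + (j + 1) * sx := by ring
      have e2 : y0 + pvMinorDisp m M j * sy = y0 + pvMinorDisp m M (j + 1) * sy := by rw [hq1]
      have e3 : (2 * m * (j + 1) - M - 2 * M * pvMinorDisp m M j) + 2 * m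
          = 2 * m * ((j + 1) + 1) - M - 2 * M * pvMinorDisp m M (j + 1) := by rw [hq1]; ring
      rw [e1, e2, e3, ih (j + 1) (by push_cast at hj ⊢; omega)]
      simp [List.append_assoc, hq1]

theorem steep_loop (M m sx sy x0 y0 : Int) (hM : 0 < M) (hm0 : 0 ≤ m) (hm : m ≤ M) :
    ∀ (k : Nat) (j : Int), j + (k : Int) = M + 1 → ∀ (xs ys : List Int),
      pvLoopSteep k (x0 + pvMinorDisp m M j * sx) (y0 + j * sy) sx sy m M
          (2 * m * (j + 1) - M - 2 * M * pvMinorDisp m M j) xs ys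
        = (xs ++ (PySem.List.pyRange j (M + 1) 1).map (fun i => x0 + pvMinorDisp m M i * sx),
           ys ++ (PySem.List.pyRange j (M + 1) 1).map (fun i => y0 + i * sy)) := by
  intro k
  induction k with
  | zero =>
    intro j hj xs ys
    have : PySem.List.pyRange j (M + 1) 1 = [] := PySem.List.pyRange_one_eq_nil (by omega)
    simp [pvLoopSteep, this]
  | succ k ih =>
    intro j hj xs ys
    have hjlt : j < M + 1 := by push_cast at hj; omega
    rw [PySem.List.pyRange_one_cons hjlt]
    simp only [pvLoopSteep]
    by_cases h0 : 2 * m * (j + 1) - M - 2 * M * pvMinorDisp m M j ≥ 0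
    · rw [if_pos h0, if_pos h0]
      have hq1 := pvMinorDisp_succ_pos m M j hM hm0 hm h0
      have e1 : y0 + j * sy + sy = y0 + (j + 1) * sy := by ring
      have e2 : x0 + pvMinorDisp m M j * sx + sx = x0 + pvMinorDisp m M (j + 1) * sx := by
        rw [hq1]; ring
      have e3 : (2 * m * (j + 1) - M - 2 * M * pvMinorDisp m M j - 2 * M) + 2 * m
          = 2 * m * ((j + 1) + 1) - M - 2 * M * pvMinorDisp m M (j + 1) := by rw [hq1]; ring
      rw [e1, e2, e3, ih (j + 1) (by push_cast at hj ⊢; omega)]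
      simp [List.append_assoc]
    · rw [if_neg h0, if_neg h0]
      have hq1 := pvMinorDisp_succ_neg m M j hM hm0 hm h0
      have e1 : y0 + j * sy + sy = y0 + (j + 1) * sy := by ring
      have e2 : x0 + pvMinorDisp m M j * sx = x0 + pvMinorDisp m M (j + 1) * sx := by rw [hq1]
      have e3 : (2 * m * (j + 1) - M - 2 * M * pvMinorDisp m M j) + 2 * m
          = 2 * m * ((j + 1) + 1) - M - 2 * M * pvMinorDisp m M (j + 1) := by rw [hq1]; ring
      rw [e1, e2, e3, ih (j + 1) (by push_cast at hj ⊢; omega)]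
      simp [List.append_assoc, hq1]

-- ===== VERDICT (by name: the statement is the Claim_ definition above) =====
theorem draw_bresenham_line_spec : Claim_equal_draw_bresenham_line := by
  intro a b c d _
  unfold Spec_draw_bresenham_line draw_bresenham_line draw_bresenham_line_alt
  set dx := |c - a| with hdx
  set dy := |d - b| with hdy
  have hdx0 : 0 ≤ dx := abs_nonneg _
  have hdy0 : 0 ≤ dy := abs_nonneg _
  by_cases hsl : dy ≤ dx
  · simp only [if_pos hsl]
    by_cases hz : dx = 0
    · have hz' : dy = 0 := le_antisymm (hz ▸ hsl) hdy0
      simp [hz, hz', pvLoopShallow]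
    · have hM : 0 < dx := lt_of_le_of_ne hdx0 (Ne.symm hz)
      rw [if_neg hz]
      have hfold := fold_pair (fun i => a + i * (if c > a then (1 : Int) else -1))
        (fun i => b + pvMinorDisp dy dx i * (if d > b then (1 : Int) else -1))
        (PySem.List.pyRange 0 (dx + 1) 1) [] []
      rw [hfold]
      have hk : (0 : Int) + ((dx + 1).toNat : Int) = dx + 1 := by omega
      have := shallow_loop dx dy (if c > a then (1 : Int) else -1) (if d > b then (1 : Int) else -1)
        a b hM hdy0 hsl (dx + 1).toNat 0 hk [] []
      rw [pvMinorDisp_zero dy dx hM] at this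
      simp only [zero_mul, add_zero, mul_zero, sub_zero, zero_add, mul_one] at this
      exact this
  · simp only [if_neg hsl]
    have hM : 0 < dy := by omega
    have hz : ¬ dy = 0 := by omega
    rw [if_neg hz]
    have hfold := fold_pair (fun i => a + pvMinorDisp dx dy i * (if c > a then (1 : Int) else -1))
      (fun i => b + i * (if d > b then (1 : Int) else -1))
      (PySem.List.pyRange 0 (dy + 1) 1) [] []
    rw [hfold]
    have hk : (0 : Int) + ((dy + 1).toNat : Int) = dy + 1 := by omega
    have := steep_loop dy dx (if c > a then (1 : Int) else -1) (if d > b then (1 : Int) else -1)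
      a b hM hdx0 (by omega) (dy + 1).toNat 0 hk [] []
    rw [pvMinorDisp_zero dx dy hM] at this
    simp only [zero_mul, add_zero, mul_zero, sub_zero, zero_add, mul_one] at this
    exact this
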